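-- pv_equiv track=rewrite | github.com/MrBrantCode/unitest_baseline | mut_generate/mist_train_taco/taco_16488/solution.py | calculate_exam_score
-- ===== SOURCE A (Python) =====
-- def calculate_exam_score(correct_answers, student_answers):
--     """
--     Calculate the score for a student's exam answers based on the correct answers.
--
--     :param correct_answers: List of strings representing the correct answers.
--     :param student_answers: List of strings representing the student's answers.
--     :return: Integer representing the calculated score.
--     """
--     score = 0
--     for correct, student in zip(correct_answers, student_answers):
--         if student == "":
--             continue
--         elif student == correct:
--             score += 4
--         else:
--             score -= 1
--     return max(0, score)
-- ===== SOURCE B (Python) =====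
-- def calculate_exam_score(correct_answers, student_answers):
--     pairs = list(zip(correct_answers, student_answers))
--     attempted = sum(1 for _, s in pairs if s != "")
--     correct = sum(1 for c, s in pairs if s != "" and s == c)
--     return max(0, 5 * correct - attempted)
-- ===== Notes on version B (the rewrite author's own statement) =====
-- stated objective: alternative
-- what changed: Replaces the signed per-element accumulator with two nonnegative counts (attempted, correct) over zip and the closed form max(0, 5*correct - attempted).
import Mathlib
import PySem

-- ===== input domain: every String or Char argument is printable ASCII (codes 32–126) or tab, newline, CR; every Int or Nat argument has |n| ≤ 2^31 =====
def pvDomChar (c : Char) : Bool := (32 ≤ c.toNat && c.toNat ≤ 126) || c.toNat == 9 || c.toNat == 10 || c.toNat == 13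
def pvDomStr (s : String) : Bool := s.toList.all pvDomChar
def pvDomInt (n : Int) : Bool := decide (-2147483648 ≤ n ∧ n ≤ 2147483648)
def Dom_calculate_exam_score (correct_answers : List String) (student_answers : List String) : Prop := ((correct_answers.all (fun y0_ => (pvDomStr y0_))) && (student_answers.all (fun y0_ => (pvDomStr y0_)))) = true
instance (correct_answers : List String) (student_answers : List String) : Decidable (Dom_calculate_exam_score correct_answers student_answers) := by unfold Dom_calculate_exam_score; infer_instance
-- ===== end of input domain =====

-- B replaces A's signed per-element accumulator by two counts (attempted, correct) and the closed form max(0, 5*correct - attempted); alternative decomposition, same cost.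

-- ===== PORT A =====
def calculate_exam_score (correct_answers : List String) (student_answers : List String) : Int :=
  let score : Int :=
    (List.zip correct_answers student_answers).foldl
      (fun score p =>
        if p.2 = "" then score
        else if p.2 = p.1 then score + 4
        else score - 1) 0
  max 0 score

-- ===== PORT B =====
def calculate_exam_score_alt (correct_answers : List String) (student_answers : List String) : Int :=
  let pairs := List.zip correct_answers student_answers
  let attempted : Int := pairs.countP (fun p => p.2 ≠ "")
  let correct : Int := pairs.countP (fun p => p.2 ≠ "" ∧ p.2 = p.1)
  max 0 (5 * correct - attempted)

-- ===== PRECONDITION & SPEC =====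
def Spec_calculate_exam_score (correct_answers : List String) (student_answers : List String) (out : Int) : Prop := out = calculate_exam_score_alt correct_answers student_answers
instance (correct_answers : List String) (student_answers : List String) (out : Int) : Decidable (Spec_calculate_exam_score correct_answers student_answers out) := by unfold Spec_calculate_exam_score; infer_instance

-- ===== CLAIM (what is proved, stated in full; the proofs are below) =====
def Claim_equal_calculate_exam_score : Prop := ∀ (correct_answers : List String) (student_answers : List String), Dom_calculate_exam_score correct_answers student_answers → Spec_calculate_exam_score correct_answers student_answers (calculate_exam_score correct_answers student_answers)

-- ===== LEMMAS AND PROOFS =====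

theorem pv_foldl_counts (l : List (String × String)) (s : Int) :
    l.foldl (fun score p =>
        if p.2 = "" then score
        else if p.2 = p.1 then score + 4
        else score - 1) s
      = s + 5 * (l.countP (fun p => p.2 ≠ "" ∧ p.2 = p.1) : Int)
          - (l.countP (fun p => p.2 ≠ "") : Int) := by
  induction l generalizing s with
  | nil => simp
  | cons hd tl ih =>
    obtain ⟨a, b⟩ := hd
    simp only [List.foldl_cons, List.countP_cons, ih]
    by_cases h1 : b = ""
    · simp [h1]
    · by_cases h2 : b = a
      · subst h2; simp [h1]; push_cast; ring
      · simp [h1, h2]; push_cast; ring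

-- ===== VERDICT (by name: the statement is the Claim_ definition above) =====
theorem calculate_exam_score_spec : Claim_equal_calculate_exam_score := by
  intro c s _
  unfold Spec_calculate_exam_score calculate_exam_score calculate_exam_score_alt
  simp only [pv_foldl_counts, zero_add]
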